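-- pv_equiv track=rewrite | github.com/itisamazingxx/oa | jpmorgan/Pairs.py | findNumOfPairs
-- ===== SOURCE A (Python) =====
-- def findNumOfPairs(a, b):
--   ans = 0
--   n = len(a)
--   usedA = [False] * n
--   usedB = [False] * n
--   for i in range(n):
--     for j in range(n):
--       if a[i] > b[j] and not usedA[i] and not usedB[j]:
--         usedA[i] = True
--         usedB[j] = True
--         ans += 1
--   return ans
-- ===== SOURCE B (Python) =====
-- def _tmin(t):
--     if t[0] == 'empty':
--         return None
--     return t[1]
--
-- def _mn(x, y):
--     if x is None:
--         return y
--     if y is None: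
--         return x
--     return x if x < y else y
--
-- def _build(vals):
--     if len(vals) == 1:
--         return ('leaf', vals[0])
--     m = len(vals) // 2
--     l = _build(vals[:m])
--     r = _build(vals[m:])
--     return ('node', _mn(_tmin(l), _tmin(r)), l, r)
--
-- def _extract(t, x):
--     # leftmost active leaf with value < x, or None if there is none
--     m = _tmin(t)
--     if m is None or m >= x:
--         return None
--     if t[0] == 'leaf':
--         return ('empty',)
--     _, _, l, r = t
--     nl = _extract(l, x)
--     if nl is not None:
--         l = nl
--     else:
--         r = _extract(r, x)
--     return ('node', _mn(_tmin(l), _tmin(r)), l, r)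
--
-- def findNumOfPairs(a, b):
--     n = len(a)
--     vals = list(b[:n])
--     if not vals:
--         return 0
--     t = _build(vals)
--     ans = 0
--     for x in a:
--         nt = _extract(t, x)
--         if nt is not None:
--             t = nt
--             ans += 1
--     return ans
-- ===== Notes on version B (the rewrite author's own statement) =====
-- stated objective: faster
-- what changed: Replaces the O(n^2) nested index loops with boolean used-arrays by a divide-and-conquer min-tree (segment tree) over the first n values of b: for each a[i] it descends to the leftmost still-active leaf with value < a[i] and deactivates it, which is exactly A's greedy first-unused-index match.
import Mathlib
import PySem

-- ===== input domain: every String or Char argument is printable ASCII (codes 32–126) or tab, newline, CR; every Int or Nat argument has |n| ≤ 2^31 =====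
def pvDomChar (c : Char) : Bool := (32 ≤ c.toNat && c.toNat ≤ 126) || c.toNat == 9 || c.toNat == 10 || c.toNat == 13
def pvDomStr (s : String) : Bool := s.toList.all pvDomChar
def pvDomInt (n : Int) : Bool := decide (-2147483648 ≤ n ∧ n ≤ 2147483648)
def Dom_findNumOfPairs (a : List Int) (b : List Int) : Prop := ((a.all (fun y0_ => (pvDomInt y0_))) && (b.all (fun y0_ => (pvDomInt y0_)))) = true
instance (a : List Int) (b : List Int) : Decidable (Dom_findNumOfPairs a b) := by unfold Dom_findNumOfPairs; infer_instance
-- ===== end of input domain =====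

-- B replaces A's O(n^2) nested loops by an O(n log n) min-tree (segment-tree) greedy; equal return value on Pre_.

-- ===== PORT A =====
-- inner loop: for j in range(n): ...  (fuel only makes the index recursion structural; it never cuts an iteration)
def loopJA (a b : List Int) (i : Nat) : Nat → Nat → Int × List Bool × List Bool → Int × List Bool × List Bool
  | 0, _, st => st
  | fuel + 1, j, st =>
    if j < a.length then
      if a.getD i 0 > b.getD j 0 ∧ st.2.1.getD i false = false ∧ st.2.2.getD j false = false then
        loopJA a b i fuel (j + 1) (st.1 + 1, st.2.1.set i true, st.2.2.set j true)
      else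
        loopJA a b i fuel (j + 1) st
    else st

-- outer loop: for i in range(n): ...
def loopIA (a b : List Int) : Nat → Nat → Int × List Bool × List Bool → Int × List Bool × List Bool
  | 0, _, st => st
  | fuel + 1, i, st =>
    if i < a.length then loopIA a b fuel (i + 1) (loopJA a b i a.length 0 st) else st

def findNumOfPairs (a : List Int) (b : List Int) : Int :=
  (loopIA a b a.length 0 (0, List.replicate a.length false, List.replicate a.length false)).1

-- ===== PORT B =====
-- min-tree: each node caches the minimum of the still-active leaf values below it (none = all inactive)
inductive BT where
  | empty : BT
  | leaf : Int → BT
  | node : Option Int → BT → BT → BT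
deriving DecidableEq, Repr

def tmin : BT → Option Int
  | .empty => none
  | .leaf v => some v
  | .node m _ _ => m

-- _mn: minimum of two optional values (None = +infinity)
def mn : Option Int → Option Int → Option Int
  | none, y => y
  | x, none => x
  | some u, some v => some (if u < v then u else v)

-- _build(vals)  (fuel = vs.length bounds the recursion depth; each recursive call strictly shrinks the list)
def buildT : Nat → List Int → BT
  | 0, _ => .empty
  | fuel + 1, vs =>
    if vs.length = 1 then .leaf (vs.headD 0)
    else if vs.length ≤ 1 then .empty   -- not reached from findNumOfPairs_alt (vals nonempty)
    else
      let m := vs.length / 2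
      .node (mn (tmin (buildT fuel (vs.take m))) (tmin (buildT fuel (vs.drop m))))
        (buildT fuel (vs.take m)) (buildT fuel (vs.drop m))

-- _extract(t, x): Python first tests `m is None or m >= x` on tmin t, then branches on the shape;
-- here the two tests are merged per constructor, computing the same values step for step.
def extractT (t : BT) (x : Int) : Option BT :=
  match t with
  | .empty => none                                   -- tmin = None
  | .leaf v => if v ≥ x then none else some .empty
  | .node m l r =>
    match m with
    | none => none
    | some mv =>
      if mv ≥ x then none
      else
        match extractT l x with
        | some nl => some (.node (mn (tmin nl) (tmin r)) nl r)
        | none =>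
          match extractT r x with
          | some nr => some (.node (mn (tmin l) (tmin nr)) l nr)
          | none => none                              -- not reached on well-formed trees

-- for x in a: ...
def loopB : List Int → BT → Int → Int
  | [], _, ans => ans
  | x :: xs, t, ans =>
    match extractT t x with
    | none => loopB xs t ans
    | some t' => loopB xs t' (ans + 1)

def findNumOfPairs_alt (a : List Int) (b : List Int) : Int :=
  let vals := b.take a.length
  if vals.isEmpty then 0
  else loopB a (buildT vals.length vals) 0

-- ===== PRECONDITION & SPEC =====
-- A indexes b at every j < len(a); it raises IndexError iff len(b) < len(a) (and a is nonempty).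
def Pre_findNumOfPairs (a : List Int) (b : List Int) : Prop := a.length ≤ b.length
instance (a : List Int) (b : List Int) : Decidable (Pre_findNumOfPairs a b) := by
  unfold Pre_findNumOfPairs; infer_instance

def pvWitness_findNumOfPairs : List Int × List Int := ([2, 1], [0, 3])

def Spec_findNumOfPairs (a : List Int) (b : List Int) (out : Int) : Prop :=
  out = findNumOfPairs_alt a b
instance (a : List Int) (b : List Int) (out : Int) : Decidable (Spec_findNumOfPairs a b out) := by
  unfold Spec_findNumOfPairs; infer_instance

-- ===== CLAIM (what is proved, stated in full; the proofs are below) =====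
def Claim_equal_findNumOfPairs : Prop :=
  ∀ (a : List Int) (b : List Int), Dom_findNumOfPairs a b → Pre_findNumOfPairs a b →
    Spec_findNumOfPairs a b (findNumOfPairs a b)

-- ===== LEMMAS AND PROOFS =====

-- reference model: list of active (some v) / inactive (none) slots, scanned left to right
def fx (x : Int) : List (Option Int) → Option (List (Option Int))
  | [] => none
  | o :: rest =>
    match o with
    | some v => if v < x then some (none :: rest) else (fx x rest).map (o :: ·)
    | none => (fx x rest).map (o :: ·)

def greedyL : List Int → List (Option Int) → Int
  | [], _ => 0
  | x :: xs, l =>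
    match fx x l with
    | none => greedyL xs l
    | some l' => 1 + greedyL xs l'

def actives : BT → List (Option Int)
  | .empty => [none]
  | .leaf v => [some v]
  | .node _ l r => actives l ++ actives r

def minL (l : List (Option Int)) : Option Int := l.foldr mn none

def wfT : BT → Prop
  | .empty => True
  | .leaf _ => True
  | .node m l r => m = mn (tmin l) (tmin r) ∧ wfT l ∧ wfT r

theorem mn_assoc (x y z : Option Int) : mn (mn x y) z = mn x (mn y z) := by
  cases x <;> cases y <;> cases z <;> simp [mn] <;> split_ifs <;> first | rfl | omega

theorem foldr_mn_init (l : List (Option Int)) (c : Option Int) :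
    l.foldr mn c = mn (l.foldr mn none) c := by
  induction l with
  | nil => cases c <;> simp [mn]
  | cons o l ih => simp [List.foldr, ih, mn_assoc]

theorem minL_append (l r : List (Option Int)) : minL (l ++ r) = mn (minL l) (minL r) := by
  simp [minL, List.foldr_append]
  rw [foldr_mn_init]

theorem tmin_wf : ∀ t : BT, wfT t → tmin t = minL (actives t)
  | .empty, _ => by simp [tmin, actives, minL, mn]
  | .leaf v, _ => by simp [tmin, actives, minL, mn]
  | .node m l r, h => by
    obtain ⟨hm, hl, hr⟩ := h
    show m = minL (actives l ++ actives r)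
    rw [minL_append, hm, tmin_wf l hl, tmin_wf r hr]

theorem minL_le : ∀ (l : List (Option Int)) (v : Int), some v ∈ l →
    ∃ m, minL l = some m ∧ m ≤ v := by
  intro l
  induction l with
  | nil => intro v hv; simp at hv
  | cons o l ih =>
    intro v hv
    have hstep : minL (o :: l) = mn o (minL l) := rfl
    rcases List.mem_cons.1 hv with h | h
    · subst h
      cases hL : minL l with
      | none => exact ⟨v, by rw [hstep, hL]; rfl, le_refl v⟩
      | some w =>
        refine ⟨if v < w then v else w, ?_, by split_ifs <;> omega⟩
        rw [hstep, hL]; rfl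
    · obtain ⟨m, hm, hmv⟩ := ih v h
      cases o with
      | none => exact ⟨m, by rw [hstep, hm]; rfl, hmv⟩
      | some u =>
        refine ⟨if u < m then u else m, ?_, by split_ifs <;> omega⟩
        rw [hstep, hm]; rfl

theorem minL_attained : ∀ (L : List (Option Int)) (m : Int), minL L = some m →
    ∃ v, some v ∈ L ∧ v ≤ m := by
  intro L
  induction L with
  | nil => intro m hm; simp [minL] at hm
  | cons o L ih =>
    intro m hm
    have hstep : minL (o :: L) = mn o (minL L) := rfl
    rw [hstep] at hm
    cases o with
    | none =>
      cases hL : minL L with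
      | none => rw [hL] at hm; simp [mn] at hm
      | some w =>
        rw [hL] at hm; simp [mn] at hm
        obtain ⟨v, hv, hle⟩ := ih w hL
        exact ⟨v, List.mem_cons_of_mem _ hv, by omega⟩
    | some u =>
      cases hL : minL L with
      | none =>
        rw [hL] at hm; simp [mn] at hm
        exact ⟨u, List.mem_cons_self, by omega⟩
      | some w =>
        rw [hL] at hm; simp [mn] at hm
        by_cases huw : u < w
        · rw [if_pos huw] at hm
          exact ⟨u, List.mem_cons_self, by omega⟩
        · rw [if_neg huw] at hm
          obtain ⟨v, hv, hle⟩ := ih w hL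
          exact ⟨v, List.mem_cons_of_mem _ hv, by omega⟩

theorem fx_none_iff (x : Int) (l : List (Option Int)) :
    fx x l = none ↔ ∀ v : Int, some v ∈ l → x ≤ v := by
  induction l with
  | nil => simp [fx]
  | cons o l ih =>
    constructor
    · intro h v hv
      cases o with
      | none =>
        simp only [fx, Option.map_eq_none_iff] at h
        rcases List.mem_cons.1 hv with hv | hv
        · exact absurd hv (by simp)
        · exact ih.1 h v hv
      | some u =>
        by_cases hu : u < x
        · simp [fx, hu] at h
        · simp only [fx, if_neg hu, Option.map_eq_none_iff] at h
          rcases List.mem_cons.1 hv with hv | hv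
          · simp at hv; omega
          · exact ih.1 h v hv
    · intro h
      cases o with
      | none =>
        simp only [fx, Option.map_eq_none_iff]
        exact ih.2 (fun v hv => h v (List.mem_cons_of_mem _ hv))
      | some u =>
        have hu : ¬ u < x := by
          have := h u List.mem_cons_self; omega
        simp only [fx, if_neg hu, Option.map_eq_none_iff]
        exact ih.2 (fun v hv => h v (List.mem_cons_of_mem _ hv))

theorem fx_append (x : Int) (l1 l2 : List (Option Int)) :
    fx x (l1 ++ l2) =
      match fx x l1 with
      | some l1' => some (l1' ++ l2)
      | none => (fx x l2).map (l1 ++ ·) := by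
  induction l1 with
  | nil => simp [fx]
  | cons o l ih =>
    cases o with
    | none =>
      simp only [List.cons_append, fx, ih]
      cases fx x l <;> cases fx x l2 <;> simp
    | some v =>
      by_cases hv : v < x
      · simp [fx, hv]
      · simp only [List.cons_append, fx, if_neg hv, ih]
        cases fx x l <;> cases fx x l2 <;> simp

theorem extract_spec (x : Int) :
    ∀ t : BT, wfT t →
      (extractT t x = none → fx x (actives t) = none) ∧
      (∀ t', extractT t x = some t' → wfT t' ∧ fx x (actives t) = some (actives t'))
  | .empty, _ => by
    refine ⟨fun _ => by simp [actives, fx], fun t' h => by simp [extractT] at h⟩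
  | .leaf v, _ => by
    constructor
    · intro h
      simp only [extractT] at h
      by_cases hv : v ≥ x
      · simp [actives, fx, show ¬ v < x by omega]
      · simp [hv] at h
    · intro t' h
      simp only [extractT] at h
      by_cases hv : v ≥ x
      · simp [hv] at h
      · rw [if_neg hv] at h
        have ht' : t' = BT.empty := by
          cases h; rfl
        subst ht'
        exact ⟨trivial, by simp [actives, fx, show v < x by omega]⟩
  | .node m l r, h => by
    obtain ⟨hm, hl, hr⟩ := h
    have IHl := extract_spec x l hl
    have IHr := extract_spec x r hr
    have hmin : m = minL (actives l ++ actives r) := by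
      have := tmin_wf (.node m l r) ⟨hm, hl, hr⟩
      simpa [tmin, actives] using this
    constructor
    · intro hnone
      simp only [extractT] at hnone
      rw [fx_none_iff]
      intro v hv
      cases hmc : m with
      | none =>
        rw [hmc] at hmin
        obtain ⟨mv, hmv, _⟩ := minL_le (actives l ++ actives r) v (by simpa [actives] using hv)
        rw [← hmin] at hmv; simp at hmv
      | some mv =>
        rw [hmc] at hnone hmin
        by_cases hge : mv ≥ x
        · obtain ⟨mw, hmw, hle⟩ := minL_le (actives l ++ actives r) v (by simpa [actives] using hv)
          rw [← hmin] at hmw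
          simp at hmw
          omega
        · exfalso
          simp only [if_neg hge] at hnone
          rcases hcl : extractT l x with _ | nl
          · rcases hcr : extractT r x with _ | nr
            · have h1 := IHl.1 hcl
              have h2 := IHr.1 hcr
              obtain ⟨v', hv', hle⟩ := minL_attained _ mv hmin.symm
              rw [fx_none_iff] at h1 h2
              rcases List.mem_append.1 hv' with hmem | hmem
              · have := h1 v' hmem; omega
              · have := h2 v' hmem; omega
            · rw [hcl, hcr] at hnone; simp at hnone
          · rw [hcl] at hnone; simp at hnone
    · intro t' hsome
      simp only [extractT] at hsome
      cases hmc : m with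
      | none => rw [hmc] at hsome; simp at hsome
      | some mv =>
        rw [hmc] at hsome
        by_cases hge : mv ≥ x
        · simp [hge] at hsome
        · simp only [if_neg hge] at hsome
          rcases hcl : extractT l x with _ | nl
          · rcases hcr : extractT r x with _ | nr
            · rw [hcl, hcr] at hsome; simp at hsome
            · rw [hcl, hcr] at hsome
              have ht' : t' = BT.node (mn (tmin l) (tmin nr)) l nr := by
                cases hsome; rfl
              subst ht'
              obtain ⟨hwr, hfr⟩ := IHr.2 nr hcr
              have hfl := IHl.1 hcl
              refine ⟨⟨rfl, hl, hwr⟩, ?_⟩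
              simp [actives, fx_append, hfl, hfr]
          · rw [hcl] at hsome
            have ht' : t' = BT.node (mn (tmin nl) (tmin r)) nl r := by
              cases hsome; rfl
            subst ht'
            obtain ⟨hwl, hfl⟩ := IHl.2 nl hcl
            refine ⟨⟨rfl, hwl, hr⟩, ?_⟩
            simp [actives, fx_append, hfl]

theorem loopB_greedy (xs : List Int) :
    ∀ (t : BT) (ans : Int), wfT t → loopB xs t ans = ans + greedyL xs (actives t) := by
  induction xs with
  | nil => intro t ans _; simp [loopB, greedyL]
  | cons x xs ih =>
    intro t ans hwf
    rcases hc : extractT t x with _ | t'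
    · have hfx := (extract_spec x t hwf).1 hc
      simp only [loopB, greedyL, hc, hfx]
      exact ih t ans hwf
    · obtain ⟨hwf', hfx⟩ := (extract_spec x t hwf).2 t' hc
      simp only [loopB, greedyL, hc, hfx]
      rw [ih t' (ans + 1) hwf']
      ring

theorem buildT_unfold (fuel : Nat) (vs : List Int) (h1 : ¬ vs.length = 1) (h0 : ¬ vs.length ≤ 1) :
    buildT (fuel + 1) vs =
      .node (mn (tmin (buildT fuel (vs.take (vs.length / 2)))) (tmin (buildT fuel (vs.drop (vs.length / 2)))))
        (buildT fuel (vs.take (vs.length / 2))) (buildT fuel (vs.drop (vs.length / 2))) := by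
  show (if vs.length = 1 then BT.leaf (vs.headD 0) else if vs.length ≤ 1 then BT.empty else _) = _
  rw [if_neg h1, if_neg h0]

theorem buildT_wf_actives' : ∀ (fuel : Nat) (vs : List Int), vs.length ≤ fuel → vs ≠ [] →
    wfT (buildT fuel vs) ∧ actives (buildT fuel vs) = vs.map some := by
  intro fuel
  induction fuel with
  | zero =>
    intro vs hn hne
    exact absurd (List.eq_nil_of_length_eq_zero (by omega)) hne
  | succ n ih =>
    intro vs hn hne
    by_cases h1 : vs.length = 1
    · obtain ⟨v, rfl⟩ := List.length_eq_one_iff.1 h1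
      exact ⟨trivial, by simp [buildT, actives]⟩
    · by_cases h0 : vs.length ≤ 1
      · exact absurd (List.eq_nil_of_length_eq_zero (by omega)) hne
      · rw [buildT_unfold n vs h1 h0]
        have hm1 : 1 ≤ vs.length / 2 := by omega
        have hmlt : vs.length / 2 < vs.length := by omega
        have htl : (vs.take (vs.length / 2)).length ≤ n := by
          rw [List.length_take]; omega
        have hdl : (vs.drop (vs.length / 2)).length ≤ n := by
          rw [List.length_drop]; omega
        have htne : vs.take (vs.length / 2) ≠ [] := by
          intro h; have h2 := congrArg List.length h
          rw [List.length_take, Nat.min_eq_left (by omega), List.length_nil] at h2; omega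
        have hdne : vs.drop (vs.length / 2) ≠ [] := by
          intro h; have h2 := congrArg List.length h
          rw [List.length_drop, List.length_nil] at h2; omega
        obtain ⟨hwl, hal⟩ := ih _ htl htne
        obtain ⟨hwr, har⟩ := ih _ hdl hdne
        refine ⟨⟨rfl, hwl, hwr⟩, ?_⟩
        show actives _ ++ actives _ = vs.map some
        rw [hal, har, ← List.map_append, List.take_append_drop]

theorem buildT_wf_actives (vs : List Int) (hne : vs ≠ []) :
    wfT (buildT vs.length vs) ∧ actives (buildT vs.length vs) = vs.map some :=
  buildT_wf_actives' vs.length vs (le_refl _) hne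

theorem greedyL_nil_slots (xs : List Int) : greedyL xs [] = 0 := by
  induction xs with
  | nil => rfl
  | cons x xs ih => simp [greedyL, fx, ih]

theorem alt_eq_greedy (a b : List Int) :
    findNumOfPairs_alt a b = greedyL a ((b.take a.length).map some) := by
  unfold findNumOfPairs_alt
  by_cases h : b.take a.length = []
  · simp [h, greedyL_nil_slots]
  · obtain ⟨hwf, hact⟩ := buildT_wf_actives _ h
    rw [if_neg (by simpa [List.isEmpty_iff] using h)]
    rw [loopB_greedy a _ 0 hwf, hact]
    ring

-- ===== A-side =====

def maskL : List Int → List Bool → List (Option Int)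
  | v :: bt, u :: uB => (if u then none else some v) :: maskL bt uB
  | _, _ => []

-- first index k with bt[k] < x and uB[k] = false
def ffL (x : Int) : List Int → List Bool → Option Nat
  | v :: bt, u :: uB =>
    if v < x ∧ u = false then some 0 else (ffL x bt uB).map (· + 1)
  | _, _ => none

theorem ffL_maskL (x : Int) : ∀ (bt : List Int) (uB : List Bool),
    (ffL x bt uB = none → fx x (maskL bt uB) = none) ∧
    (∀ k, ffL x bt uB = some k →
      fx x (maskL bt uB) = some (maskL bt (uB.set k true))) := by
  intro bt
  induction bt with
  | nil => intro uB; constructor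
           · intro _; cases uB <;> simp [maskL, fx]
           · intro k h; simp [ffL] at h
  | cons v bt ih =>
    intro uB
    cases uB with
    | nil => constructor
             · intro _; simp [maskL, fx]
             · intro k h; simp [ffL] at h
    | cons u uB =>
      by_cases hc : v < x ∧ u = false
      · constructor
        · intro h; simp [ffL, hc] at h
        · intro k h
          simp [ffL, hc] at h
          subst h
          obtain ⟨hv, hu⟩ := hc
          subst hu
          simp [maskL, fx, hv]
      · have hff : ffL x (v :: bt) (u :: uB) = (ffL x bt uB).map (· + 1) := by
          simp [ffL, hc]
        constructor
        · intro h
          rw [hff] at h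
          simp only [Option.map_eq_none_iff] at h
          have h2 := (ih uB).1 h
          cases u with
          | false =>
            have hv : ¬ v < x := by
              by_contra hv; exact hc ⟨hv, rfl⟩
            simp [maskL, fx, hv, h2]
          | true => simp [maskL, fx, h2]
        · intro k h
          rw [hff] at h
          cases hf : ffL x bt uB with
          | none => rw [hf] at h; simp at h
          | some k' =>
            rw [hf] at h; simp at h
            subst h
            have h2 := (ih uB).2 k' hf
            cases u with
            | false =>
              have hv : ¬ v < x := by
                by_contra hv; exact hc ⟨hv, rfl⟩
              simp [maskL, fx, hv, h2]
            | true => simp [maskL, fx, h2]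

-- once usedA[i] is set, the rest of the inner loop does nothing
theorem getD_set_self (l : List Bool) (i : Nat) (hi : i < l.length) :
    (l.set i true).getD i false = true := by
  rw [List.getD_eq_getElem?_getD, List.getElem?_set_self hi]; rfl

theorem getD_set_ne (l : List Bool) (i k : Nat) (h : i ≠ k) :
    (l.set i true).getD k false = l.getD k false := by
  rw [List.getD_eq_getElem?_getD, List.getElem?_set_ne h, ← List.getD_eq_getElem?_getD]

theorem loopJA_done (a b : List Int) (i : Nat) :
    ∀ (fuel j : Nat) (st : Int × List Bool × List Bool),
      st.2.1.getD i false = true → loopJA a b i fuel j st = st := by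
  intro fuel
  induction fuel with
  | zero => intro j st _; rfl
  | succ f ih =>
    intro j st hA
    show (if j < a.length then _ else st) = st
    by_cases hj : j < a.length
    · rw [if_pos hj, if_neg (by rw [List.getD_eq_getElem?_getD] at hA; simp [hA]),
        ih (j + 1) st hA]
    · rw [if_neg hj]

theorem loopJA_spec (a b : List Int) (i : Nat)
    (hpre : a.length ≤ b.length) (hi : i < a.length) :
    ∀ (fuel j : Nat) (ans : Int) (uA uB : List Bool), a.length - j ≤ fuel →
      uA.length = a.length → uB.length = a.length →
      uA.getD i false = false →
      loopJA a b i fuel j (ans, uA, uB) =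
        (match ffL (a.getD i 0) ((b.take a.length).drop j) (uB.drop j) with
        | none => (ans, uA, uB)
        | some k => (ans + 1, uA.set i true, uB.set (j + k) true)) := by
  intro fuel
  induction fuel with
  | zero =>
    intro j ans uA uB hle hlA hlB hA
    rw [List.drop_eq_nil_of_le (by simp; omega)]
    cases uB.drop j <;> rfl
  | succ f ih =>
    intro j ans uA uB hle hlA hlB hA
    show (if j < a.length then _ else (ans, uA, uB)) = _
    by_cases hj : j < a.length
    · have hjb : j < (b.take a.length).length := by simp; omega
      have hju : j < uB.length := by omega
      have hbt : (b.take a.length).drop j = b.getD j 0 :: (b.take a.length).drop (j + 1) := by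
        rw [List.drop_eq_getElem_cons hjb, List.getElem_take]
        rw [List.getD_eq_getElem?_getD, List.getElem?_eq_getElem (by omega)]
        rfl
      have hub : uB.drop j = uB.getD j false :: uB.drop (j + 1) := by
        rw [List.drop_eq_getElem_cons hju, List.getD_eq_getElem?_getD,
          List.getElem?_eq_getElem hju]
        rfl
      rw [if_pos hj]
      by_cases hc : a.getD i 0 > b.getD j 0 ∧ uA.getD i false = false ∧ uB.getD j false = false
      · rw [if_pos hc]
        obtain ⟨h1, _, h3⟩ := hc
        rw [hbt, hub, ffL, if_pos ⟨by omega, h3⟩]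
        rw [loopJA_done a b i f (j + 1) _ (getD_set_self uA i (by omega))]
        simp
      · rw [if_neg hc]
        rw [ih (j + 1) ans uA uB (by omega) hlA hlB hA]
        rw [hbt, hub, ffL]
        have hcond : ¬ (b.getD j 0 < a.getD i 0 ∧ uB.getD j false = false) := by
          intro ⟨hx, hy⟩
          exact hc ⟨by omega, hA, hy⟩
        rw [if_neg hcond]
        cases hff : ffL (a.getD i 0) ((b.take a.length).drop (j + 1)) (uB.drop (j + 1)) with
        | none => simp
        | some k =>
          simp only [Option.map_some]
          have : j + 1 + k = j + (k + 1) := by omega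
          rw [this]
    · rw [if_neg hj]
      rw [List.drop_eq_nil_of_le (by simp; omega)]
      cases uB.drop j <;> rfl

theorem loopIA_spec (a b : List Int) (hpre : a.length ≤ b.length) :
    ∀ (fuel i : Nat) (ans : Int) (uA uB : List Bool), a.length - i ≤ fuel →
      uA.length = a.length → uB.length = a.length →
      (∀ k, i ≤ k → uA.getD k false = false) →
      (loopIA a b fuel i (ans, uA, uB)).1 =
        ans + greedyL (a.drop i) (maskL (b.take a.length) uB) := by
  intro fuel
  induction fuel with
  | zero =>
    intro i ans uA uB hle hlA hlB hInv
    rw [List.drop_eq_nil_of_le (by omega)]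
    simp [loopIA, greedyL]
  | succ f ih =>
    intro i ans uA uB hle hlA hlB hInv
    show ((if i < a.length then loopIA a b f (i + 1) (loopJA a b i a.length 0 (ans, uA, uB))
      else (ans, uA, uB))).1 = _
    by_cases hi : i < a.length
    · rw [if_pos hi]
      rw [loopJA_spec a b i hpre hi a.length 0 ans uA uB (by omega) hlA hlB (hInv i (le_refl i))]
      have hda : a.drop i = a.getD i 0 :: a.drop (i + 1) := by
        rw [List.drop_eq_getElem_cons hi, List.getD_eq_getElem?_getD,
          List.getElem?_eq_getElem hi]
        rfl
      rw [hda]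
      simp only [List.drop_zero, greedyL]
      cases hff : ffL (a.getD i 0) (b.take a.length) uB with
      | none =>
        have hfx := (ffL_maskL (a.getD i 0) (b.take a.length) uB).1 hff
        rw [hfx]
        exact ih (i + 1) ans uA uB (by omega) hlA hlB (fun k hk => hInv k (by omega))
      | some k =>
        have hfx := (ffL_maskL (a.getD i 0) (b.take a.length) uB).2 k hff
        rw [hfx]
        simp only [Nat.zero_add]
        rw [ih (i + 1) (ans + 1) (uA.set i true) (uB.set k true) (by omega)
          (by simp [hlA]) (by simp [hlB])
          (fun k' hk' => by rw [getD_set_ne uA i k' (by omega)]; exact hInv k' (by omega))]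
        ring
    · rw [if_neg hi, List.drop_eq_nil_of_le (by omega)]
      simp [greedyL]

theorem maskL_replicate : ∀ (bt : List Int) (n : Nat), bt.length ≤ n →
    maskL bt (List.replicate n false) = bt.map some := by
  intro bt
  induction bt with
  | nil => intro n _; cases n <;> rfl
  | cons v bt ih =>
    intro n hn
    cases n with
    | zero => simp at hn
    | succ n =>
      rw [List.replicate_succ]
      show (some v) :: maskL bt (List.replicate n false) = some v :: bt.map some
      rw [ih n (by simpa using hn)]

-- ===== VERDICT (by name: the statement is the Claim_ definition above) =====
theorem findNumOfPairs_spec : Claim_equal_findNumOfPairs := by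
  intro a b _ hpre
  unfold Pre_findNumOfPairs at hpre
  unfold Spec_findNumOfPairs findNumOfPairs
  rw [alt_eq_greedy]
  have hrep : ∀ k, (List.replicate a.length false).getD k false = false := by
    intro k
    rw [List.getD_eq_getElem?_getD]
    cases h : (List.replicate a.length false)[k]? with
    | none => rfl
    | some v =>
      rw [List.eq_of_mem_replicate (List.mem_of_getElem? h)]
      rfl
  rw [loopIA_spec a b hpre a.length 0 0 _ _ (by omega) (by simp) (by simp)
    (fun k _ => hrep k)]
  rw [maskL_replicate (b.take a.length) a.length (by simp)]
  simp
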